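-- pv_equiv track=rewrite | github.com/Arsenho/2D-Sequence-Alignment | utils.py | dr_matrice_func
-- ===== SOURCE A (Python) =====
-- def del_func(char):
--     return 1
--
-- def dr_matrice_func(x):
--     motif = x
--     assert isinstance(motif, list)
--     assert isinstance(motif[0], str)
--
--     dr_matrix = []
--
--     row = len(motif)
--     column = len(motif[0])
--
--     # Initializing the scores list
--     for i in range(row):
--         inter = []
--         for j in range(column):
--             inter.append(0)
--         dr_matrix.append(inter)
--
--     for i in range(0, row):
--         for j in range(0, column):
--             step = 0
--             for p in range(j):
--                 substring = motif[i][p]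
--                 step += del_func(substring)
--             dr_matrix[i][j] = step
--
--     return dr_matrix
-- ===== SOURCE B (Python) =====
-- def del_func(char):
--     return 1
--
-- def dr_matrice_func(x):
--     motif = x
--     assert isinstance(motif, list)
--     assert isinstance(motif[0], str)
--
--     row = len(motif)
--     column = len(motif[0])
--
--     # build the shared index row once, then replicate independent copies
--     template = list(range(column))
--     dr_matrix = []
--     for _ in range(row):
--         dr_matrix.append(template.copy())
--     return dr_matrix
-- ===== Notes on version B (the rewrite author's own statement) =====
-- stated objective: simpler
-- what changed: A fills a zero matrix and recomputes each cell by summing del_func over range(j); B computes one template row list(range(column)) once and replicates independent copies of it per row.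
import Mathlib
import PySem

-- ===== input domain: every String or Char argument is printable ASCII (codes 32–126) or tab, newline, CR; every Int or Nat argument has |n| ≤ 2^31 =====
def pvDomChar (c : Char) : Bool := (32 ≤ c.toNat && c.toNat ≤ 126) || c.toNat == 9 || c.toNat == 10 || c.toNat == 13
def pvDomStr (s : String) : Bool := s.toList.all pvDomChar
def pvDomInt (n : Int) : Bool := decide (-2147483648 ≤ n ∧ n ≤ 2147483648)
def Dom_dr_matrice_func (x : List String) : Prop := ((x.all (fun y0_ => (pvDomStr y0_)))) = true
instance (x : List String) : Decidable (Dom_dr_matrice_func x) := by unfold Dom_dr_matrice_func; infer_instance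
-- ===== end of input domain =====

-- B replaces A's per-cell accumulation with one template row list(range(column)), replicated per row (simpler).

-- ===== PORT A =====
def del_func (_char : Char) : Int := 1

-- literal transliteration of A; element reads use the total pyGetD/getD forms, exact because
-- Pre_ guarantees every index the Python reads is in range
def dr_matrice_func (x : List String) : List (List Int) :=
  let motif := x
  let row : Int := PySem.List.len motif
  let column : Int := PySem.Str.len (PySem.List.pyGetD motif 0 "")
  -- first loop nest: initialise the scores list with zeros
  let dr_matrix : List (List Int) :=
    (PySem.List.pyRange 0 row 1).foldl (fun acc _i =>
      let inter : List Int := (PySem.List.pyRange 0 column 1).foldl (fun r _j => r ++ [(0 : Int)]) []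
      acc ++ [inter]) []
  -- second loop nest: dr_matrix[i][j] = step
  (PySem.List.pyRange 0 row 1).foldl (fun m i =>
    (PySem.List.pyRange 0 column 1).foldl (fun m j =>
      let step : Int :=
        (PySem.List.pyRange 0 j 1).foldl (fun s p =>
          let substring := (PySem.Str.pyGet? (PySem.List.pyGetD motif i "") p).getD ' '
          s + del_func substring) 0
      PySem.List.pySetD m i (PySem.List.pySetD (PySem.List.pyGetD m i []) j step)) m) dr_matrix

-- ===== PORT B =====
def dr_matrice_func_alt (x : List String) : List (List Int) :=
  let motif := x
  let row : Int := PySem.List.len motif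
  let column : Int := PySem.Str.len (PySem.List.pyGetD motif 0 "")
  let template : List Int := PySem.List.pyRange 0 column 1
  List.replicate row.toNat template

-- ===== PRECONDITION & SPEC =====
-- Pre_ excludes exactly the inputs on which the Python A raises IndexError: the empty list
-- (motif[0]) and ragged inputs where some string is shorter than len(motif[0]) - 1 (motif[i][p]).
def Pre_dr_matrice_func (x : List String) : Prop :=
  x ≠ [] ∧ ∀ s ∈ x, (x.headD "").length ≤ s.length + 1
instance (x : List String) : Decidable (Pre_dr_matrice_func x) := by
  unfold Pre_dr_matrice_func; infer_instance
def pvWitness_dr_matrice_func : List String := (["abc", "xyz"])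

def Spec_dr_matrice_func (x : List String) (out : List (List Int)) : Prop := out = dr_matrice_func_alt x
instance (x : List String) (out : List (List Int)) : Decidable (Spec_dr_matrice_func x out) := by unfold Spec_dr_matrice_func; infer_instance

-- ===== CLAIM (what is proved, stated in full; the proofs are below) =====
def Claim_equal_dr_matrice_func : Prop := ∀ (x : List String), Dom_dr_matrice_func x → Pre_dr_matrice_func x → Spec_dr_matrice_func x (dr_matrice_func x)

-- ===== LEMMAS AND PROOFS =====

-- phase 1 of A: appending a constant element n times
theorem foldl_append_const {α : Type} (n : ℕ) (e : α) (init : List α) :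
    (PySem.List.pyRange 0 (n : Int) 1).foldl (fun acc _ => acc ++ [e]) init
      = init ++ List.replicate n e := by
  induction n generalizing init with
  | zero => simp
  | succ k ih =>
      have h : ((k + 1 : ℕ) : Int) = (k : Int) + 1 := by push_cast; ring
      rw [h, PySem.List.pyRange_one_succ_right (by positivity), List.foldl_append, ih]
      simp [List.replicate_succ']

-- A's innermost p-loop sums del_func = 1, j times
theorem step_eq (j : Int) (f : Int → Char) (hj : 0 ≤ j) :
    (PySem.List.pyRange 0 j 1).foldl (fun s p => s + del_func (f p)) 0 = j := by
  obtain ⟨n, rfl⟩ := Int.eq_ofNat_of_zero_le hj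
  induction n with
  | zero => simp
  | succ k ih =>
      have h : ((k + 1 : ℕ) : Int) = (k : Int) + 1 := by push_cast; ring
      rw [h, PySem.List.pyRange_one_succ_right (by positivity), List.foldl_append]
      simp only [List.foldl, del_func] at *
      omega

theorem take_set_succ {α : Type} (r : List α) (a : ℕ) (v : α) (h : a < r.length) :
    (r.set a v).take (a+1) = r.take a ++ [v] := by
  have hlen : (r.take a).length = a := by simp; omega
  rw [List.set_eq_take_append_cons_drop, if_pos h]
  rw [show a + 1 = (r.take a).length + 1 by rw [hlen]]
  rw [List.take_append]
  simp

-- A's j-loop overwrites positions a..a+d-1 of row i with their column index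
theorem inner_loop (G : List (List Int) → Int → List (List Int)) (i : ℕ)
    (hG : ∀ (m' : List (List Int)) (j : Int), 0 ≤ j →
      G m' j = PySem.List.pySetD m' (i : Int)
        (PySem.List.pySetD (PySem.List.pyGetD m' (i : Int) []) j j))
    (m : List (List Int)) (hi : i < m.length) :
    ∀ (d a : ℕ) (r : List Int), r.length = a + d →
    (PySem.List.pyRange (a : Int) ((a + d : ℕ) : Int) 1).foldl G (m.set i r)
      = m.set i (r.take a ++ PySem.List.pyRange (a : Int) ((a + d : ℕ) : Int) 1) := by
  intro d
  induction d with
  | zero =>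
      intro a r hr
      rw [PySem.List.pyRange_one_eq_nil (by omega)]
      rw [List.take_of_length_le (by omega)]
      simp
  | succ k ih =>
      intro a r hr
      rw [PySem.List.pyRange_one_cons (by exact_mod_cast (by omega : (a:Int) < ((a+(k+1):ℕ) : Int)))]
      simp only [List.foldl_cons]
      have hget : PySem.List.pyGetD (m.set i r) (i : Int) [] = r := by
        simp [List.getD, hi]
      have happ : G (m.set i r) (a : Int) = m.set i (r.set a (a : Int)) := by
        rw [hG _ _ (by positivity), hget]
        simp [List.set_set]
      rw [happ]
      have hc1 : ((a : Int) + 1) = ((a + 1 : ℕ) : Int) := by push_cast; ring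
      have hc2 : (((a + (k+1) : ℕ)) : Int) = (((a + 1) + k : ℕ) : Int) := by push_cast; ring
      rw [hc1, hc2, ih (a+1) (r.set a (a:Int)) (by simp [hr]; omega)]
      congr 1
      rw [take_set_succ r a (a:Int) (by omega), ← hc1, ← hc2]
      simp

-- A's i-loop replaces each of the rows t..t+n-1 by the index row
theorem outer_loop (H : List (List Int) → Int → List (List Int)) (c : ℕ)
    (hH : ∀ (m : List (List Int)) (i : ℕ), i < m.length → (m.getD i []).length = c →
      H m (i : Int) = m.set i (PySem.List.pyRange 0 (c : Int) 1)) :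
    ∀ (n t : ℕ) (m : List (List Int)), m.length = t + n → (∀ r ∈ m, r.length = c) →
    (PySem.List.pyRange (t : Int) ((t + n : ℕ) : Int) 1).foldl H m
      = m.take t ++ List.replicate n (PySem.List.pyRange 0 (c : Int) 1) := by
  intro n
  induction n with
  | zero =>
      intro t m hm _
      rw [PySem.List.pyRange_one_eq_nil (by omega)]
      simp [List.take_of_length_le (show m.length ≤ t by omega)]
  | succ k ih =>
      intro t m hm hall
      have ht : t < m.length := by omega
      rw [PySem.List.pyRange_one_cons (by exact_mod_cast (by omega : (t:Int) < ((t+(k+1):ℕ) : Int)))]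
      simp only [List.foldl_cons]
      rw [hH m t ht (by rw [List.getD_eq_getElem m [] ht]; exact hall _ (List.getElem_mem ht))]
      have hc1 : ((t : Int) + 1) = ((t + 1 : ℕ) : Int) := by push_cast; ring
      have hc2 : (((t + (k+1) : ℕ)) : Int) = (((t + 1) + k : ℕ) : Int) := by push_cast; ring
      rw [hc1, hc2, ih (t+1) _ (by simp; omega)
        (by intro r hr
            rcases List.mem_or_eq_of_mem_set hr with h | h
            · exact hall r h
            · simp [h, PySem.List.length_pyRange_one])]
      rw [take_set_succ m t _ ht]
      simp [List.replicate_succ]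

-- ===== VERDICT (by name: the statement is the Claim_ definition above) =====
theorem dr_matrice_func_spec : Claim_equal_dr_matrice_func := by
  intro x _hdom hpre
  obtain ⟨hne, _hrag⟩ := hpre
  rcases x with _ | ⟨s, rest⟩
  · exact absurd rfl hne
  unfold Spec_dr_matrice_func dr_matrice_func dr_matrice_func_alt
  simp only []
  have hrow : PySem.List.len (s :: rest) = ((rest.length + 1 : ℕ) : Int) := by
    simp [PySem.List.len_eq]
  have hcol : PySem.Str.len (PySem.List.pyGetD (s :: rest) 0 "") = ((s.length : ℕ) : Int) := by
    simp [PySem.List.pyGetD]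
  rw [hrow, hcol]
  -- phase 1: the zero matrix
  rw [foldl_append_const (rest.length + 1)
    ((PySem.List.pyRange 0 ((s.length : ℕ) : Int) 1).foldl (fun r _j => r ++ [(0 : Int)]) []) []]
  rw [foldl_append_const s.length (0 : Int) []]
  simp only [List.nil_append]
  -- phase 2: the update loops, via outer_loop / inner_loop
  have houter := outer_loop
    (fun m i =>
      (PySem.List.pyRange 0 ((s.length : ℕ) : Int) 1).foldl (fun m j =>
        let step : Int :=
          (PySem.List.pyRange 0 j 1).foldl (fun sa p =>
            let substring := (PySem.Str.pyGet? (PySem.List.pyGetD (s :: rest) i "") p).getD ' '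
            sa + del_func substring) 0
        PySem.List.pySetD m i (PySem.List.pySetD (PySem.List.pyGetD m i []) j step)) m)
    s.length
    (by
      intro m i hi hrowlen
      have hG : ∀ (m' : List (List Int)) (j : Int), 0 ≤ j →
          (fun (m : List (List Int)) (j : Int) =>
            let step : Int :=
              (PySem.List.pyRange 0 j 1).foldl (fun sa p =>
                let substring := (PySem.Str.pyGet? (PySem.List.pyGetD (s :: rest) (i : Int) "") p).getD ' '
                sa + del_func substring) 0
            PySem.List.pySetD m (i : Int) (PySem.List.pySetD (PySem.List.pyGetD m (i : Int) []) j step)) m' j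
          = PySem.List.pySetD m' (i : Int)
              (PySem.List.pySetD (PySem.List.pyGetD m' (i : Int) []) j j) := by
        intro m' j hj
        have := step_eq j
          (fun p => (PySem.Str.pyGet? (PySem.List.pyGetD (s :: rest) (i : Int) "") p).getD ' ') hj
        simp only []
        rw [this]
      have h0 : m.set i (m.getD i []) = m := by
        rw [List.getD_eq_getElem m [] hi, List.set_getElem_self]
      have := inner_loop _ i hG m hi s.length 0 (m.getD i []) (by simpa using hrowlen)
      rw [h0] at this
      simp only [Nat.cast_zero, Nat.zero_add, List.take_zero, List.nil_append] at this
      simp only []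
      exact this)
  have hm0len : (List.replicate (rest.length + 1) (List.replicate s.length (0:Int))).length
      = 0 + (rest.length + 1) := by simp
  have hm0all : ∀ r ∈ List.replicate (rest.length + 1) (List.replicate s.length (0:Int)),
      r.length = s.length := by
    intro r hr; rw [List.eq_of_mem_replicate hr]; simp
  have hfin := houter (rest.length + 1) 0 _ hm0len hm0all
  simp only [Nat.cast_zero, Nat.zero_add, List.take_zero, List.nil_append] at hfin
  rw [hfin]
  simp
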